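-- pv_equiv track=rewrite | github.com/Abdullahprogramme/APS-Project | Files/Another_Main.py | math_riddle
-- ===== SOURCE A (Python) =====
-- def math_riddle(answer): # sample answer list: [194, 285, 376, 467, 558, 649, 740, 831, 922]
--     correct_answer = int(answer)
--     lst = []
--     for number in range(100, 1000):
--         ones_digit = number % 10          # Extracting
--         tens_digit = (number // 10) % 10  # the
--         hundreds_digit = number // 100    # digits
--         if tens_digit == ones_digit + 5 and hundreds_digit == tens_digit - 8: # Checking the conditions
--             lst.append(number) # append to list if conditions are met True
--     return correct_answer in lst # comparision
-- ===== SOURCE B (Python) =====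
-- def math_riddle(answer):
--     x = int(answer)
--     if x < 100 or x > 999:
--         return False
--     ones = x % 10
--     tens = (x // 10) % 10
--     hundreds = x // 100
--     return tens == ones + 5 and hundreds == tens - 8
-- ===== Notes on version B (the rewrite author's own statement) =====
-- stated objective: faster
-- what changed: B replaces A's loop over all three-digit numbers building the list of those satisfying the digit riddle (just [194]) followed by a membership test with a direct O(1) digit check on the input itself.
import Mathlib
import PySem

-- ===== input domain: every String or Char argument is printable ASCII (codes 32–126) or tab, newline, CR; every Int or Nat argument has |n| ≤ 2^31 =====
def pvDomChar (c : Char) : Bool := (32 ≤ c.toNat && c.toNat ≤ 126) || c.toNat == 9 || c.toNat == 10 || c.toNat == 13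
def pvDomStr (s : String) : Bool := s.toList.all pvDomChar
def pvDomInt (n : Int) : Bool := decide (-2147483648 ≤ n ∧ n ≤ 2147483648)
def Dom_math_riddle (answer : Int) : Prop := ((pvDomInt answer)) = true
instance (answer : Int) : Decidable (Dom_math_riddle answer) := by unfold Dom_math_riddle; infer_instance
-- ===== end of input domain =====

-- B computes the digit-riddle check in O(1) directly on the input instead of A's fixed loop over 100..999 building a list and testing membership.
-- ===== PORT A =====
-- A: loop over range(100,1000), collect numbers meeting the digit conditions, then membership test
def math_riddle (answer : Int) : Bool :=
  let correct_answer := answer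
  let lst := (PySem.List.pyRange 100 1000 1).foldl
    (fun lst number =>
      let ones_digit := PySem.Int.mod number 10
      let tens_digit := PySem.Int.mod (PySem.Int.floordiv number 10) 10
      let hundreds_digit := PySem.Int.floordiv number 100
      if tens_digit = ones_digit + 5 ∧ hundreds_digit = tens_digit - 8 then lst ++ [number] else lst)
    []
  decide (correct_answer ∈ lst)

-- ===== PORT B =====
-- B: direct O(1) digit check, no table
def math_riddle_alt (answer : Int) : Bool :=
  let x := answer
  if x < 100 ∨ x > 999 then false
  else
    let ones := PySem.Int.mod x 10
    let tens := PySem.Int.mod (PySem.Int.floordiv x 10) 10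
    let hundreds := PySem.Int.floordiv x 100
    decide (tens = ones + 5 ∧ hundreds = tens - 8)

-- ===== PRECONDITION & SPEC =====
def Spec_math_riddle (answer : Int) (out : Bool) : Prop := out = math_riddle_alt answer
instance (answer : Int) (out : Bool) : Decidable (Spec_math_riddle answer out) := by unfold Spec_math_riddle; infer_instance

-- ===== CLAIM (what is proved, stated in full; the proofs are below) =====
def Claim_equal_math_riddle : Prop := ∀ (answer : Int), Dom_math_riddle answer → Spec_math_riddle answer (math_riddle answer)

-- ===== LEMMAS AND PROOFS =====

-- A's list is exactly [194]
lemma lstA_eq : (PySem.List.pyRange 100 1000 1).foldl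
    (fun lst number =>
      let ones_digit := PySem.Int.mod number 10
      let tens_digit := PySem.Int.mod (PySem.Int.floordiv number 10) 10
      let hundreds_digit := PySem.Int.floordiv number 100
      if tens_digit = ones_digit + 5 ∧ hundreds_digit = tens_digit - 8 then lst ++ [number] else lst)
    [] = [194] := by
  set_option maxRecDepth 4000 in decide

-- B returns true exactly at 194
lemma alt_iff (x : Int) : math_riddle_alt x = true ↔ x = 194 := by
  unfold math_riddle_alt
  by_cases h : x < 100 ∨ x > 999
  · simp only [h, if_true]
    constructor
    · intro hc; exact absurd hc (by simp)
    · intro hx; omega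
  · simp only [h, if_false]
    push_neg at h
    rw [PySem.Int.mod_eq_emod_of_pos (by norm_num : (0:Int) < 10),
        PySem.Int.floordiv_eq_ediv_of_pos (by norm_num : (0:Int) < 10),
        PySem.Int.mod_eq_emod_of_pos (by norm_num : (0:Int) < 10),
        PySem.Int.floordiv_eq_ediv_of_pos (by norm_num : (0:Int) < 100)]
    have hdd : x / 10 / 10 = x / 100 := by
      rw [Int.ediv_ediv_eq_ediv_mul (by norm_num)]; norm_num
    simp only [decide_eq_true_eq]
    omega

-- ===== VERDICT (by name: the statement is the Claim_ definition above) =====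
theorem math_riddle_spec : Claim_equal_math_riddle := by
  intro answer _
  unfold Spec_math_riddle math_riddle
  rw [lstA_eq]
  simp only [List.mem_singleton]
  by_cases h : answer = 194
  · simp [h, (alt_iff 194).mpr rfl]
  · simp only [h, decide_false]
    by_contra hc
    exact h ((alt_iff answer).mp (by simpa using hc))
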